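-- pv_equiv track=rewrite | github.com/fengges/leetcode | 501-550/520. 检测大写字母.py | isDa
-- ===== SOURCE A (Python) =====
-- def isDa(s):
--     n=0
--     for i in s:
--         t = ord(i)
--         if t >= 65 and t <= 90:
--             n+=1
--     if n==len(s):
--         return 1
--     elif n==0:
--         return -1
--     else:
--         return 0
-- ===== SOURCE B (Python) =====
-- def isDa(s):
--     if all(65 <= ord(c) <= 90 for c in s):
--         return 1
--     if not any(65 <= ord(c) <= 90 for c in s):
--         return -1
--     return 0
-- ===== Notes on version B (the rewrite author's own statement) =====
-- stated objective: idiomatic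
-- what changed: Replaces the counting loop plus count-vs-length comparison with two short-circuiting predicate passes (all-uppercase, then no-uppercase).
import Mathlib
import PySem

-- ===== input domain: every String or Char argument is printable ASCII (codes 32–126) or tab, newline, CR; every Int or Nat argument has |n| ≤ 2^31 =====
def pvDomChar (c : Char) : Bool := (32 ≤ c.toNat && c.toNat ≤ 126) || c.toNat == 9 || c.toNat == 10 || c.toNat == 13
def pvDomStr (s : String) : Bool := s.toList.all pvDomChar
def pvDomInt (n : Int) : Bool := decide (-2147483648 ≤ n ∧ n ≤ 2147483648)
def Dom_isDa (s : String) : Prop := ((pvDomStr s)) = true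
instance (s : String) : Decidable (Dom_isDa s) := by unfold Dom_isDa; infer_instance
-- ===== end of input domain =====

-- B replaces A's counting loop with two short-circuiting predicate checks (all-uppercase, then no-uppercase); objective: idiomatic.


-- ===== PORT A =====
-- literal port: loop accumulating a count, then compare with len(s)
def isDa (s : String) : Int :=
  let n : Int := s.toList.foldl (fun n c =>
    let t : Int := c.toNat
    if t ≥ 65 ∧ t ≤ 90 then n + 1 else n) 0
  if n = (s.toList.length : Int) then 1
  else if n = 0 then -1
  else 0

-- ===== PORT B =====
def isUpperAscii (c : Char) : Bool := 65 ≤ (c.toNat : Int) && (c.toNat : Int) ≤ 90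

def isDa_alt (s : String) : Int :=
  if s.toList.all isUpperAscii then 1
  else if !(s.toList.any isUpperAscii) then -1
  else 0

-- ===== PRECONDITION & SPEC =====
def Spec_isDa (s : String) (out : Int) : Prop := out = isDa_alt s
instance (s : String) (out : Int) : Decidable (Spec_isDa s out) := by unfold Spec_isDa; infer_instance

-- ===== CLAIM (what is proved, stated in full; the proofs are below) =====
def Claim_equal_isDa : Prop := ∀ (s : String), Dom_isDa s → Spec_isDa s (isDa s)

-- ===== LEMMAS AND PROOFS =====

theorem isDa_count (l : List Char) (n : Int) :
    l.foldl (fun n c =>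
      let t : Int := c.toNat
      if t ≥ 65 ∧ t ≤ 90 then n + 1 else n) n = n + (l.countP isUpperAscii : Int) := by
  induction l generalizing n with
  | nil => simp
  | cons c l ih =>
    simp only [List.foldl_cons, List.countP_cons, ih]
    by_cases h : (65 : Int) ≤ c.toNat ∧ (c.toNat : Int) ≤ 90
    · have hb : isUpperAscii c = true := by simp [isUpperAscii, h.1, h.2]
      rw [if_pos ⟨h.1, h.2⟩, hb]
      simp
      ring
    · have hb : ¬ (isUpperAscii c = true) := by simpa [isUpperAscii] using h
      rw [Bool.not_eq_true] at hb
      rw [if_neg (fun hc => h ⟨hc.1, hc.2⟩), hb]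
      simp

theorem isDa_eq_alt (s : String) : isDa s = isDa_alt s := by
  unfold isDa isDa_alt
  rw [isDa_count]
  simp only [zero_add]
  by_cases hall : s.toList.all isUpperAscii
  · have : s.toList.countP isUpperAscii = s.toList.length :=
      List.countP_eq_length.mpr (by simpa [List.all_eq_true] using hall)
    simp [hall, this]
  · have hne : s.toList.countP isUpperAscii ≠ s.toList.length := by
      intro h
      exact hall (by simpa [List.all_eq_true] using List.countP_eq_length.mp h)
    by_cases hany : s.toList.any isUpperAscii
    · have : s.toList.countP isUpperAscii ≠ 0 := by
        obtain ⟨c, hc, hp⟩ := List.any_eq_true.mp hany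
        rw [Ne, List.countP_eq_zero]
        push_neg
        exact ⟨c, hc, by simpa using hp⟩
      simp only [hall, hany]
      rw [if_neg (by exact_mod_cast hne), if_neg (by exact_mod_cast this)]
      simp
    · have : s.toList.countP isUpperAscii = 0 := by
        rw [List.countP_eq_zero]
        intro c hc hp
        exact hany (List.any_eq_true.mpr ⟨c, hc, hp⟩)
      simp only [hall, hany]
      rw [if_neg (by exact_mod_cast hne)]
      simp [this]

-- ===== VERDICT (by name: the statement is the Claim_ definition above) =====
theorem isDa_spec : Claim_equal_isDa := by
  intro s _
  unfold Spec_isDa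
  exact isDa_eq_alt s
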